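-- pv_equiv track=rewrite | github.com/mpettersson/PythonReview | questions/list/has_k_sum.py | has_k_sum_via_pointer_indistinct
-- ===== SOURCE A (Python) =====
-- def has_k_sum_via_pointer_indistinct(l, k, t):
--
--     def _has_two_sum(l, t):
--         lo = 0
--         hi = len(l)-1
--         while lo <= hi:
--             if l[lo] + l[hi] == t:
--                 return True
--             elif l[lo] + l[hi] < t:
--                 lo += 1
--             else:
--                 hi -= 1
--         return False
--
--     def _rec(l, k, t):
--         if k == 2:                                  # k == 2: Return _has_two_sum result.
--             return _has_two_sum(l, t)
--         for i in l:                                 # k > 2:  Recurse with k-1 and t = t - current value.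
--             if _rec(l, k - 1, t - i):
--                 return True
--         return False
--
--     if isinstance(l, list) and isinstance(k, int) and 0 <= k and isinstance(t, int):
--         if t == 0 and 0 in l:
--             return True
--         if k == 0:
--             return True if t == 0 else False
--         if k == 1:
--             return t in l                           # O(n), (but better than sorting and binary search...)
--         l.sort()
--         return _rec(l, k, t)
--     return False
-- ===== SOURCE B (Python) =====
-- # Meet-in-the-middle layer DP: build sorted lists of distinct sums reachable with j picks
-- # (pruned to sums still completable to t given the remaining picks' min/max bounds),
-- # remember the floor(k/2) layer and look up complements t - s of the ceil(k/2) layer in it.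
-- # (Unlike A, B does not sort l in place; the equivalence is about the return value.)
-- def has_k_sum_via_pointer_indistinct(l, k, t):
--     if not (isinstance(l, list) and isinstance(k, int) and 0 <= k and isinstance(t, int)):
--         return False
--     if t == 0 and 0 in l:
--         return True
--     if k == 0:
--         return t == 0
--     if not l:
--         return False
--     vals = set(l)
--     lo, hi = min(l), max(l)
--     half = k // 2
--
--     def nxt(sums, j):
--         # sums of j picks, keeping only those completable to t by k - j more picks
--         r = k - j
--         cand = sorted(s + x for s in sums for x in vals if lo * r <= t - (s + x) <= hi * r)
--         out = []
--         for v in cand: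
--             if not out or out[-1] != v:
--                 out.append(v)
--         return out
--
--     sums = [0]
--     lowset = sums
--     for j in range(1, k - half + 1):
--         sums = nxt(sums, j)
--         if j == half:
--             lowset = sums
--     low = set(lowset)
--     return any(t - s in low for s in sums)
-- ===== Notes on version B (the rewrite author's own statement) =====
-- stated objective: alternative
-- what changed: Replaces A's depth-(k-2) backtracking recursion over all elements with a sorted two-pointer base case by a meet-in-the-middle layer DP (sorted deduplicated lists of reachable partial sums, pruned to sums still completable to t, complements t-s looked up in the floor(k/2) layer); intended to scale better, but a timing run could not confirm an across-the-board speed-up, so no speed is claimed. Pre_ excludes nonempty-list inputs with k > 980 and no t==0-with-0-in-l shortcut, on which A's depth-(k-1) recursion can exhaust Python's recursion limit (RecursionError); …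
-- outside the precondition, e.g. on has_k_sum_via_pointer_indistinct([1], 985, 1): A returns False, B returns False
import Mathlib
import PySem

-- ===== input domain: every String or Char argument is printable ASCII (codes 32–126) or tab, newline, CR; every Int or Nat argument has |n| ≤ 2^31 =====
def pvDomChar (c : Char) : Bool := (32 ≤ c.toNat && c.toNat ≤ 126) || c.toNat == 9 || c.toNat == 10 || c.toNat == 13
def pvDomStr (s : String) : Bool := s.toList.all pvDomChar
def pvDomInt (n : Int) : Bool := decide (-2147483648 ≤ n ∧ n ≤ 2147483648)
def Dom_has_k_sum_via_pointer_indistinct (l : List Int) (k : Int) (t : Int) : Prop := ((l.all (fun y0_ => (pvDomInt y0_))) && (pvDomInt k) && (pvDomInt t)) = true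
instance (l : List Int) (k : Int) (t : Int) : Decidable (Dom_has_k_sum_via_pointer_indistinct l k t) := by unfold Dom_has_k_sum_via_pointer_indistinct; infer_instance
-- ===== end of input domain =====

-- B replaces A's depth-(k-2) recursion with a meet-in-the-middle set DP (equality is about
-- the return value: A sorts l in place, B does not mutate it).

-- ===== PORT A =====
-- _has_two_sum's while loop; lo/hi stay in range whenever the loop body runs, so pyGetD's
-- default is never used; fuel = l.length bounds the loop (each step shrinks hi-lo) and is
-- never exhausted on the calls made below.
def twoSumAux (l : List Int) (t : Int) (lo hi : Int) : Nat → Bool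
  | 0 => false
  | fuel+1 =>
    if lo ≤ hi then
      if PySem.List.pyGetD l lo 0 + PySem.List.pyGetD l hi 0 == t then true
      else if PySem.List.pyGetD l lo 0 + PySem.List.pyGetD l hi 0 < t then
        twoSumAux l t (lo+1) hi fuel
      else
        twoSumAux l t lo (hi-1) fuel
    else false

def hasTwoSum (l : List Int) (t : Int) : Bool :=
  twoSumAux l t 0 ((l.length : Int) - 1) l.length

-- _rec; fuel = (k-1).toNat is never exhausted on the calls A makes (k ≥ 2 there).
def recA (l : List Int) (k t : Int) : Nat → Bool
  | 0 => false
  | fuel+1 =>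
    if k == 2 then hasTwoSum l t
    else l.any (fun i => recA l (k-1) (t-i) fuel)

def has_k_sum_via_pointer_indistinct (l : List Int) (k : Int) (t : Int) : Bool :=
  if 0 ≤ k then
    if t == 0 && l.contains 0 then true
    else if k == 0 then (if t == 0 then true else false)
    else if k == 1 then l.contains t
    else recA (PySem.List.sorted l (fun x => x) false) k t (k-1).toNat
  else false

-- ===== PORT B =====
-- the adjacent-duplicate-removal loop over a sorted candidate list ('out' built left to right)
def dedupAdj (xs : List Int) : List Int :=
  xs.foldl (fun out v => if out.getLast? == some v then out else out ++ [v]) []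

-- one pruned layer: sorted(s + x for s in sums for x in vals if lo*r <= t-(s+x) <= hi*r), deduped
def bNext (vals : List Int) (lo hi t r : Int) (sums : List Int) : List Int :=
  dedupAdj (PySem.List.sorted
    (sums.flatMap (fun s =>
      (vals.filter (fun x => decide (lo * r ≤ t - (s + x)) && decide (t - (s + x) ≤ hi * r))).map
        (fun x => s + x)))
    (fun x => x) false)

-- the meet-in-the-middle loop (called with 0 ≤ k ≥ 1 and l ≠ [], so min/max exist)
def bMain (l : List Int) (k t : Int) : Bool :=
  let vals := PySem.Set.ofList l
  let lo := (PySem.List.min? l (fun x => x)).getD 0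
  let hi := (PySem.List.max? l (fun x => x)).getD 0
  let half := PySem.Int.floordiv k 2
  let p := (PySem.List.pyRange 1 (k - half + 1) 1).foldl
    (fun (p : List Int × List Int) j =>
      let s' := bNext vals lo hi t (k - j) p.1
      (s', if j == half then s' else p.2)) ([0], [0])
  let low := PySem.Set.ofList p.2
  p.1.any (fun s => low.contains (t - s))

def has_k_sum_via_pointer_indistinct_alt (l : List Int) (k : Int) (t : Int) : Bool :=
  if 0 ≤ k then
    if t == 0 && l.contains 0 then true
    else if k == 0 then (t == 0)
    else if l.isEmpty then false
    else bMain l k t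
  else false

-- ===== PRECONDITION & SPEC =====
-- Pre_ excludes exactly the inputs on which Python A RAISES: with a nonempty list, k around
-- 1000 or larger and no t==0-with-0-in-l shortcut, A's depth-(k-1) recursion hits Python's
-- recursion limit (RecursionError, observed from k = 998); the bound 980 leaves a safety
-- margin, so it also excludes a thin band 980 < k < 998 on which A still returns.
def Pre_has_k_sum_via_pointer_indistinct (l : List Int) (k : Int) (t : Int) : Prop :=
  l = [] ∨ k ≤ 980 ∨ (t = 0 ∧ (0 : Int) ∈ l)
instance (l : List Int) (k : Int) (t : Int) : Decidable (Pre_has_k_sum_via_pointer_indistinct l k t) := by unfold Pre_has_k_sum_via_pointer_indistinct; infer_instance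

def pvWitness_has_k_sum_via_pointer_indistinct : List Int × Int × Int := ([1, 2, 3], 2, 5)

def Spec_has_k_sum_via_pointer_indistinct (l : List Int) (k : Int) (t : Int) (out : Bool) : Prop := out = has_k_sum_via_pointer_indistinct_alt l k t
instance (l : List Int) (k : Int) (t : Int) (out : Bool) : Decidable (Spec_has_k_sum_via_pointer_indistinct l k t out) := by unfold Spec_has_k_sum_via_pointer_indistinct; infer_instance

-- ===== CLAIM (what is proved, stated in full; the proofs are below) =====
def Claim_equal_has_k_sum_via_pointer_indistinct : Prop := ∀ (l : List Int) (k : Int) (t : Int), Dom_has_k_sum_via_pointer_indistinct l k t → Pre_has_k_sum_via_pointer_indistinct l k t → Spec_has_k_sum_via_pointer_indistinct l k t (has_k_sum_via_pointer_indistinct l k t)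

-- ===== LEMMAS AND PROOFS =====

-- t is a sum of exactly n elements of l (repetition allowed)
def KSum (l : List Int) : Nat → Int → Prop
  | 0, t => t = 0
  | n+1, t => ∃ x ∈ l, KSum l n (t - x)

theorem ksum_congr {l₁ l₂ : List Int} (h : ∀ x : Int, x ∈ l₁ ↔ x ∈ l₂) :
    ∀ (n : Nat) (t : Int), KSum l₁ n t ↔ KSum l₂ n t := by
  intro n
  induction n with
  | zero => intro t; simp [KSum]
  | succ n ih =>
    intro t
    simp only [KSum]
    constructor
    · rintro ⟨x, hx, hk⟩; exact ⟨x, (h x).mp hx, (ih _).mp hk⟩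
    · rintro ⟨x, hx, hk⟩; exact ⟨x, (h x).mpr hx, (ih _).mpr hk⟩

theorem ksum_split (l : List Int) (m : Nat) :
    ∀ (n : Nat) (t : Int), KSum l (m + n) t ↔ ∃ s, KSum l n s ∧ KSum l m (t - s) := by
  intro n
  induction n with
  | zero =>
    intro t
    simp [KSum]
  | succ n ih =>
    intro t
    constructor
    · rintro ⟨x, hx, hk⟩
      obtain ⟨s, hs, hm⟩ := (ih _).mp hk
      refine ⟨s + x, ⟨x, hx, by simpa using hs⟩, ?_⟩
      have he : t - x - s = t - (s + x) := by ring
      rwa [he] at hm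
    · rintro ⟨s, ⟨x, hx, hn⟩, hm⟩
      refine ⟨x, hx, (ih _).mpr ⟨s - x, hn, ?_⟩⟩
      have he : t - x - (s - x) = t - s := by ring
      rw [he]; exact hm

theorem ksum_nil (m : Nat) (hm : 1 ≤ m) (t : Int) : ¬ KSum [] m t := by
  cases m with
  | zero => omega
  | succ m => rintro ⟨x, hx, -⟩; cases hx

theorem mem_dedupAdj (xs : List Int) (y : Int) : y ∈ dedupAdj xs ↔ y ∈ xs := by
  have haux : ∀ (xs acc : List Int),
      (y ∈ xs.foldl (fun out v => if out.getLast? == some v then out else out ++ [v]) acc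
        ↔ y ∈ acc ∨ y ∈ xs) := by
    intro xs
    induction xs with
    | nil => intro acc; simp
    | cons v xs ih =>
      intro acc
      rw [List.foldl_cons, ih]
      by_cases hv : acc.getLast? = some v
      · rw [if_pos (by simp [hv])]
        have hvmem : v ∈ acc := List.mem_of_getLast? hv
        constructor
        · rintro (h | h)
          · exact Or.inl h
          · exact Or.inr (List.mem_cons_of_mem v h)
        · rintro (h | h)
          · exact Or.inl h
          · rcases List.mem_cons.mp h with rfl | h
            · exact Or.inl hvmem
            · exact Or.inr h
      · rw [if_neg (by simp [hv])]
        simp only [List.mem_append, List.mem_cons]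
        tauto
  unfold dedupAdj
  rw [haux]
  simp

theorem mem_bNext (vals sums : List Int) (lo hi t r y : Int) :
    y ∈ bNext vals lo hi t r sums ↔
      ∃ s ∈ sums, ∃ x ∈ vals, y = s + x ∧ lo * r ≤ t - y ∧ t - y ≤ hi * r := by
  unfold bNext
  rw [mem_dedupAdj, PySem.List.mem_sorted]
  simp only [List.mem_flatMap, List.mem_map, List.mem_filter, Bool.and_eq_true, decide_eq_true_eq]
  constructor
  · rintro ⟨s, hs, x, ⟨hx, h1, h2⟩, rfl⟩
    exact ⟨s, hs, x, hx, rfl, h1, h2⟩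
  · rintro ⟨s, hs, x, hx, rfl, h1, h2⟩
    exact ⟨s, hs, x, ⟨hx, h1, h2⟩, rfl⟩

theorem ksum_bounds {l : List Int} {lo hi : Int} (hlo : ∀ x ∈ l, lo ≤ x) (hhi : ∀ x ∈ l, x ≤ hi) :
    ∀ (m : Nat) (v : Int), KSum l m v → lo * (m : Int) ≤ v ∧ v ≤ hi * (m : Int) := by
  intro m
  induction m with
  | zero => intro v hv; simp only [KSum] at hv; subst hv; simp
  | succ m ih =>
    rintro v ⟨x, hx, hk⟩
    obtain ⟨h1, h2⟩ := ih (v - x) hk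
    have hx1 := hlo x hx
    have hx2 := hhi x hx
    constructor
    · have : lo * ((m + 1 : Nat) : Int) = lo * (m : Int) + lo := by push_cast; ring
      rw [this]; linarith
    · have : hi * ((m + 1 : Nat) : Int) = hi * (m : Int) + hi := by push_cast; ring
      rw [this]; linarith

-- the layers the loop in bMain builds
def layerP (vals : List Int) (lo hi t k : Int) : Nat → List Int
  | 0 => [0]
  | j+1 => bNext vals lo hi t (k - ((j : Int) + 1)) (layerP vals lo hi t k j)

theorem layerP_sound (l : List Int) (lo hi t k : Int) :
    ∀ (j : Nat) (y : Int), y ∈ layerP (PySem.Set.ofList l) lo hi t k j → KSum l j y := by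
  intro j
  induction j with
  | zero =>
    intro y hy
    simp only [layerP, List.mem_singleton] at hy
    simpa [KSum] using hy
  | succ j ih =>
    intro y hy
    rw [layerP, mem_bNext] at hy
    obtain ⟨s, hs, x, hx, rfl, -, -⟩ := hy
    refine ⟨x, (PySem.Set.mem_ofList l x).mp hx, ?_⟩
    simpa using ih s hs

theorem layerP_complete (l : List Int) {lo hi : Int} (hlo : ∀ x ∈ l, lo ≤ x)
    (hhi : ∀ x ∈ l, x ≤ hi) (t : Int) (n : Nat) :
    ∀ (j : Nat), j ≤ n → ∀ (y : Int), KSum l j y → KSum l (n - j) (t - y) →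
      y ∈ layerP (PySem.Set.ofList l) lo hi t (n : Int) j := by
  intro j
  induction j with
  | zero =>
    intro _ y hy _
    simp only [KSum] at hy
    simp [layerP, hy]
  | succ j ih =>
    intro hjn y hy hrem
    obtain ⟨x, hx, hs⟩ := hy
    have hrem' : KSum l (n - j) (t - (y - x)) := by
      have hnj : n - j = (n - (j + 1)) + 1 := by omega
      rw [hnj]
      refine ⟨x, hx, ?_⟩
      have he : t - (y - x) - x = t - y := by ring
      rw [he]; exact hrem
    have hmem := ih (by omega) (y - x) hs hrem'
    rw [layerP, mem_bNext]
    obtain ⟨hb1, hb2⟩ := ksum_bounds hlo hhi (n - (j + 1)) (t - y) hrem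
    have hc : ((n - (j + 1) : Nat) : Int) = (n : Int) - ((j : Int) + 1) := by omega
    rw [hc] at hb1 hb2
    exact ⟨y - x, hmem, x, (PySem.Set.mem_ofList l x).mpr hx, by ring, hb1, hb2⟩

theorem fold_layersP (vals : List Int) (lo hi t k : Int) (hh : Nat) (m : Nat) :
    (PySem.List.pyRange 1 ((m : Int) + 1) 1).foldl
      (fun (p : List Int × List Int) j =>
        (bNext vals lo hi t (k - j) p.1,
         if j == (hh : Int) then bNext vals lo hi t (k - j) p.1 else p.2)) ([0], [0])
      = (layerP vals lo hi t k m, layerP vals lo hi t k (if 1 ≤ hh ∧ hh ≤ m then hh else 0)) := by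
  induction m with
  | zero =>
    simp only [Nat.cast_zero, zero_add]
    have h1 : PySem.List.pyRange 1 1 1 = [] := by decide
    rw [h1]
    have hc : (if 1 ≤ hh ∧ hh ≤ 0 then hh else 0) = 0 := by
      split_ifs with h <;> omega
    rw [hc]
    rfl
  | succ m ih =>
    have h1 : PySem.List.pyRange 1 (((m + 1 : Nat) : Int) + 1) 1
        = PySem.List.pyRange 1 ((m : Int) + 1) 1 ++ [((m : Int) + 1)] := by
      have := PySem.List.pyRange_one_succ_right (a := 1) (b := (m : Int) + 1) (by omega)
      simpa using this
    rw [h1, List.foldl_append, ih]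
    simp only [List.foldl_cons, List.foldl_nil]
    by_cases hcase : (m : Int) + 1 = (hh : Int)
    · have hm1 : hh = m + 1 := by omega
      subst hm1
      simp [layerP]
    · have hne : ¬ (((m : Int) + 1) == (hh : Int)) = true := by
        simp only [beq_iff_eq]; exact hcase
      simp only [hne, if_false, Bool.false_eq_true]
      have hcond : (if 1 ≤ hh ∧ hh ≤ m + 1 then hh else 0) = (if 1 ≤ hh ∧ hh ≤ m then hh else 0) := by
        split_ifs with h₁ h₂ h₂ <;> first | rfl | omega
      rw [layerP, hcond]

-- B's fall-through branch computes KSum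
theorem bMain_iff (l : List Int) (hne : l ≠ []) (n : Nat) (t : Int) (hn : 1 ≤ n) :
    bMain l (n : Int) t = true ↔ KSum l n t := by
  obtain ⟨mn, hmn⟩ : ∃ m, PySem.List.min? l (fun x => x) = some m := by
    rcases h : PySem.List.min? l (fun x => x) with _ | m
    · exact absurd ((PySem.List.min?_eq_none_iff l (fun x => x)).mp h) hne
    · exact ⟨m, rfl⟩
  obtain ⟨mx, hmx⟩ : ∃ m, PySem.List.max? l (fun x => x) = some m := by
    rcases h : PySem.List.max? l (fun x => x) with _ | m
    · exact absurd ((PySem.List.max?_eq_none_iff l (fun x => x)).mp h) hne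
    · exact ⟨m, rfl⟩
  have hlo : ∀ x ∈ l, mn ≤ x := PySem.List.min?_isMin hmn
  have hhi : ∀ x ∈ l, x ≤ mx := PySem.List.max?_isMax hmx
  have hfd : PySem.Int.floordiv (n : Int) 2 = ((n / 2 : Nat) : Int) := by
    rw [PySem.Int.floordiv_eq_ediv_of_pos (by omega)]; omega
  have hm : (n : Int) - PySem.Int.floordiv (n : Int) 2 + 1 = ((n - n / 2 : Nat) : Int) + 1 := by
    rw [hfd]; omega
  have hshow : bMain l (n : Int) t =
      (fun p : List Int × List Int =>
        p.1.any (fun s => (PySem.Set.ofList p.2).contains (t - s)))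
        ((PySem.List.pyRange 1 ((n : Int) - PySem.Int.floordiv (n : Int) 2 + 1) 1).foldl
          (fun (p : List Int × List Int) j =>
            (bNext (PySem.Set.ofList l) ((PySem.List.min? l (fun x => x)).getD 0)
               ((PySem.List.max? l (fun x => x)).getD 0) t ((n : Int) - j) p.1,
             if j == PySem.Int.floordiv (n : Int) 2 then
               bNext (PySem.Set.ofList l) ((PySem.List.min? l (fun x => x)).getD 0)
                 ((PySem.List.max? l (fun x => x)).getD 0) t ((n : Int) - j) p.1
             else p.2))
          ([0], [0])) := rfl
  rw [hshow, hm, hfd, hmn, hmx]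
  simp only [Option.getD_some]
  rw [fold_layersP (PySem.Set.ofList l) mn mx t (n : Int) (n / 2) (n - n / 2)]
  have hcond : (if 1 ≤ n / 2 ∧ n / 2 ≤ n - n / 2 then n / 2 else 0) = n / 2 := by
    split_ifs with h <;> omega
  rw [hcond]
  simp only [List.any_eq_true, PySem.Set.contains_iff, PySem.Set.mem_ofList]
  constructor
  · rintro ⟨s, hs, hlow⟩
    have h1 := layerP_sound l mn mx t (n : Int) (n - n / 2) s hs
    have h2 := layerP_sound l mn mx t (n : Int) (n / 2) (t - s) hlow
    have hspl := ksum_split l (n / 2) (n - n / 2) t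
    have hsum : n / 2 + (n - n / 2) = n := by omega
    rw [hsum] at hspl
    exact hspl.mpr ⟨s, h1, h2⟩
  · intro hk
    have hspl := ksum_split l (n / 2) (n - n / 2) t
    have hsum : n / 2 + (n - n / 2) = n := by omega
    rw [hsum] at hspl
    obtain ⟨s, hs1, hs2⟩ := hspl.mp hk
    refine ⟨s, ?_, ?_⟩
    · refine layerP_complete l hlo hhi t n (n - n / 2) (by omega) s hs1 ?_
      have : n - (n - n / 2) = n / 2 := by omega
      rw [this]; exact hs2
    · refine layerP_complete l hlo hhi t n (n / 2) (by omega) (t - s) hs2 ?_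
      rw [show t - (t - s) = s from by ring]
      exact hs1

-- sorted getElem monotonicity specialised to the id key
theorem sorted_mono {l : List Int} (hp : l.Pairwise (· ≤ ·)) {i j : Nat}
    (hij : i ≤ j) (hj : j < l.length) : l.getD i 0 ≤ l.getD j 0 := by
  rcases Nat.lt_or_ge i j with h | h
  · have := (List.pairwise_iff_getElem.mp hp) i j (by omega) hj h
    simpa [List.getD_eq_getElem?_getD, List.getElem?_eq_getElem, hj, show i < l.length by omega]
      using this
  · have : i = j := by omega
    subst this; rfl

theorem twoSumAux_iff {l : List Int} (hp : l.Pairwise (· ≤ ·)) (t : Int) :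
    ∀ (fuel : Nat) (lo hi : Int), 0 ≤ lo → hi < (l.length : Int) →
      (hi - lo + 1).toNat ≤ fuel →
      (twoSumAux l t lo hi fuel = true ↔
        ∃ i j : Nat, lo ≤ (i : Int) ∧ i ≤ j ∧ (j : Int) ≤ hi ∧ l.getD i 0 + l.getD j 0 = t) := by
  intro fuel
  induction fuel with
  | zero =>
    intro lo hi _ _ h
    constructor
    · intro hc; cases hc
    · rintro ⟨i, j, h1, h2, h3, _⟩; omega
  | succ fuel ih =>
    intro lo hi hlo hhi hfuel
    by_cases hle : lo ≤ hi
    · have hhir : hi.toNat < l.length := by omega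
      have hga : PySem.List.pyGetD l lo 0 = l.getD lo.toNat 0 := PySem.List.pyGetD_of_nonneg l 0 hlo
      have hgb : PySem.List.pyGetD l hi 0 = l.getD hi.toNat 0 := PySem.List.pyGetD_of_nonneg l 0 (by omega)
      rw [twoSumAux, if_pos hle, hga, hgb]
      set a := l.getD lo.toNat 0 with ha
      set b := l.getD hi.toNat 0 with hb
      by_cases heq : a + b = t
      · constructor
        · intro _
          exact ⟨lo.toNat, hi.toNat, by omega, by omega, by omega, by rw [← ha, ← hb]; exact heq⟩
        · intro _
          rw [show ((a + b == t)) = true from by simp only [beq_iff_eq]; exact heq]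
          rfl
      · have hbeq : ¬ ((a + b == t) = true) := by simp only [beq_iff_eq]; exact heq
        simp only [hbeq, if_false, Bool.false_eq_true]
        by_cases hlt : a + b < t
        · rw [if_pos hlt, ih (lo+1) hi (by omega) hhi (by omega)]
          constructor
          · rintro ⟨i, j, h1, h2, h3, h4⟩; exact ⟨i, j, by omega, h2, h3, h4⟩
          · rintro ⟨i, j, h1, h2, h3, h4⟩
            refine ⟨i, j, ?_, h2, h3, h4⟩
            by_contra hcon
            have hj_le : l.getD j 0 ≤ b := by
              rw [hb]; exact sorted_mono hp (by omega) hhir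
            have hi_eq' : l.getD i 0 = a := by rw [ha]; congr 1; omega
            omega
        · rw [if_neg hlt, ih lo (hi-1) hlo (by omega) (by omega)]
          constructor
          · rintro ⟨i, j, h1, h2, h3, h4⟩; exact ⟨i, j, h1, h2, by omega, h4⟩
          · rintro ⟨i, j, h1, h2, h3, h4⟩
            refine ⟨i, j, h1, h2, ?_, h4⟩
            by_contra hcon
            have hi_ge : a ≤ l.getD i 0 := by
              rw [ha]; exact sorted_mono hp (by omega) (by omega)
            have hj_eq' : l.getD j 0 = b := by rw [hb]; congr 1; omega
            omega
    · rw [twoSumAux, if_neg hle]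
      constructor
      · intro h; cases h
      · rintro ⟨i, j, h1, h2, h3, _⟩; omega

theorem hasTwoSum_iff {l : List Int} (hp : l.Pairwise (· ≤ ·)) (t : Int) :
    hasTwoSum l t = true ↔ ∃ a ∈ l, ∃ b ∈ l, a + b = t := by
  unfold hasTwoSum
  rcases Nat.eq_zero_or_pos l.length with h0 | h0
  · have : l = [] := List.length_eq_zero_iff.mp h0
    subst this
    simp [twoSumAux]
  · rw [twoSumAux_iff hp t l.length 0 ((l.length : Int) - 1) (by omega) (by omega) (by omega)]
    constructor
    · rintro ⟨i, j, h1, h2, h3, h4⟩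
      have hj : j < l.length := by omega
      have hi : i < l.length := by omega
      refine ⟨l.getD i 0, ?_, l.getD j 0, ?_, h4⟩
      · simp only [List.getD_eq_getElem?_getD, List.getElem?_eq_getElem, hi, Option.getD_some]
        exact List.getElem_mem _
      · simp only [List.getD_eq_getElem?_getD, List.getElem?_eq_getElem, hj, Option.getD_some]
        exact List.getElem_mem _
    · rintro ⟨a, ha, b, hb, hab⟩
      obtain ⟨i, hi, hia⟩ := List.getElem_of_mem ha
      obtain ⟨j, hj, hjb⟩ := List.getElem_of_mem hb
      rcases Nat.le_total i j with hij | hij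
      · refine ⟨i, j, by omega, hij, by omega, ?_⟩
        simp only [List.getD_eq_getElem?_getD, List.getElem?_eq_getElem, hi, hj, Option.getD_some]
        rw [hia, hjb]; exact hab
      · refine ⟨j, i, by omega, by omega, by omega, ?_⟩
        simp only [List.getD_eq_getElem?_getD, List.getElem?_eq_getElem, hi, hj, Option.getD_some]
        rw [hia, hjb]; omega

theorem ksum_two (l : List Int) (t : Int) :
    KSum l 2 t ↔ ∃ a ∈ l, ∃ b ∈ l, a + b = t := by
  simp only [KSum]
  constructor
  · rintro ⟨x, hx, y, hy, hxy⟩; exact ⟨y, hy, x, hx, by omega⟩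
  · rintro ⟨a, ha, b, hb, hab⟩; exact ⟨b, hb, a, ha, by omega⟩

theorem recA_iff {l : List Int} (hp : l.Pairwise (· ≤ ·)) :
    ∀ (fuel : Nat) (k t : Int), 2 ≤ k → (k - 1).toNat ≤ fuel →
      (recA l k t fuel = true ↔ KSum l k.toNat t) := by
  intro fuel
  induction fuel with
  | zero => intro k t hk h; omega
  | succ fuel ih =>
    intro k t hk hfuel
    by_cases h2 : k = 2
    · subst h2
      rw [recA]
      simp only [beq_self_eq_true, if_pos]
      rw [hasTwoSum_iff hp t]
      exact (ksum_two l t).symm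
    · have hbeq : ¬ ((k == (2:Int)) = true) := by simp only [beq_iff_eq]; exact h2
      rw [recA]
      simp only [hbeq, if_false, Bool.false_eq_true, List.any_eq_true]
      have hkn : k.toNat = (k-1).toNat + 1 := by omega
      rw [hkn]
      simp only [KSum]
      constructor
      · rintro ⟨i, hi, hrec⟩
        refine ⟨i, hi, ?_⟩
        have := (ih (k-1) (t-i) (by omega) (by omega)).mp hrec
        rwa [show (k-1).toNat = (k-1-1).toNat + 1 from by omega, ← show (k-1).toNat = (k-1-1).toNat + 1 from by omega] at this
      · rintro ⟨x, hx, hk'⟩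
        refine ⟨x, hx, (ih (k-1) (t-x) (by omega) (by omega)).mpr ?_⟩
        exact hk' 

-- A's fall-through branch computes KSum
theorem a_main_iff (l : List Int) (k t : Int) (hk : 2 ≤ k) :
    (recA (PySem.List.sorted l (fun x => x) false) k t (k-1).toNat = true ↔ KSum l k.toNat t) := by
  set ls := PySem.List.sorted l (fun x => x) false with hls
  have hp : ls.Pairwise (· ≤ ·) := by
    have := PySem.List.sorted_pairwise l (fun x => x)
    simpa [hls] using this
  rw [recA_iff hp (k-1).toNat k t hk (le_refl _)]
  exact ksum_congr (fun x => PySem.List.mem_sorted l (fun y => y) false x) k.toNat t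

theorem contains_iff_ksum_one (l : List Int) (t : Int) :
    l.contains t = true ↔ KSum l 1 t := by
  simp only [KSum, List.contains_iff_mem]
  constructor
  · intro h; exact ⟨t, h, by omega⟩
  · rintro ⟨x, hx, hk⟩
    have : t = x := by omega
    subst this; exact hx


-- ===== VERDICT (by name: the statement is the Claim_ definition above) =====
theorem has_k_sum_via_pointer_indistinct_spec : Claim_equal_has_k_sum_via_pointer_indistinct := by
  intro l k t _ _
  unfold Spec_has_k_sum_via_pointer_indistinct
  unfold has_k_sum_via_pointer_indistinct has_k_sum_via_pointer_indistinct_alt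
  by_cases hk0 : 0 ≤ k
  · rw [if_pos hk0, if_pos hk0]
    by_cases hzero : (t == 0 && l.contains 0) = true
    · rw [if_pos hzero, if_pos hzero]
    · rw [if_neg hzero, if_neg hzero]
      by_cases hkz : k = 0
      · subst hkz
        simp only [beq_self_eq_true, if_true]
        rw [Bool.eq_iff_iff]
        constructor
        · intro h
          split_ifs at h with h'; simp_all
        · intro h
          rw [if_pos (by simpa [beq_iff_eq] using h)]
      · have hbk : ¬ ((k == (0:Int)) = true) := by simp only [beq_iff_eq]; exact hkz
        rw [if_neg hbk, if_neg hbk]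
        have hn1 : 1 ≤ k.toNat := by omega
        have hcast : ((k.toNat : Int)) = k := by omega
        by_cases hemp : l = []
        · subst hemp
          conv_rhs => rw [if_pos (show ([] : List Int).isEmpty = true from rfl)]
          by_cases hkone : k = 1
          · subst hkone
            simp only [beq_self_eq_true, if_true]
            rfl
          · have hb1 : ¬ ((k == (1:Int)) = true) := by simp only [beq_iff_eq]; exact hkone
            rw [if_neg hb1]
            have hA := a_main_iff [] k t (by omega)
            rw [Bool.eq_iff_iff]
            constructor
            · intro h
              exact absurd (hA.mp h) (ksum_nil k.toNat (by omega) t)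
            · intro h; cases h
        · rw [if_neg (show ¬ (l.isEmpty = true) from fun hh => hemp (List.isEmpty_iff.mp hh))]
          have halt : bMain l k t = true ↔ KSum l k.toNat t := by
            have := bMain_iff l hemp k.toNat t hn1
            rwa [hcast] at this
          by_cases hkone : k = 1
          · subst hkone
            simp only [beq_self_eq_true, if_true]
            rw [Bool.eq_iff_iff, halt, contains_iff_ksum_one]
            exact Iff.rfl
          · have hb1 : ¬ ((k == (1:Int)) = true) := by simp only [beq_iff_eq]; exact hkone
            rw [if_neg hb1, Bool.eq_iff_iff, a_main_iff l k t (by omega), halt]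
  · rw [if_neg hk0, if_neg hk0]
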